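-- pv_equiv track=rewrite | github.com/XiongXin1207/Compilers | LR(0)/LR(0).py | divideEdge
-- ===== SOURCE A (Python) =====
-- def divideEdge(dfaedge):
--     newlist = []
--     k = 0
--     for i in range(1, len(dfaedge)):
--         if dfaedge[i][0] != dfaedge[i - 1][0]:
--             newlist.append(dfaedge[k:i])
--             k = i
--     newlist.append(dfaedge[k:len(dfaedge)])
--     return newlist
-- ===== SOURCE B (Python) =====
-- def divideEdge(dfaedge):
--     groups = []
--     cur = []
--     for e in dfaedge:
--         if cur and cur[-1][0] != e[0]:
--             groups.append(cur)
--             cur = [e]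
--         else:
--             cur.append(e)
--     groups.append(cur)
--     return groups
-- ===== Notes on version B (the rewrite author's own statement) =====
-- stated objective: alternative
-- what changed: A cuts the input into slices by index: it scans positions 1..n-1 and appends dfaedge[k:i] at each key change; B never indexes or slices the outer list at all - it folds over the edges themselves, growing a current group element by element and flushing it into the result when the incoming edge's key differs, then appends the final group.
import Mathlib
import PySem

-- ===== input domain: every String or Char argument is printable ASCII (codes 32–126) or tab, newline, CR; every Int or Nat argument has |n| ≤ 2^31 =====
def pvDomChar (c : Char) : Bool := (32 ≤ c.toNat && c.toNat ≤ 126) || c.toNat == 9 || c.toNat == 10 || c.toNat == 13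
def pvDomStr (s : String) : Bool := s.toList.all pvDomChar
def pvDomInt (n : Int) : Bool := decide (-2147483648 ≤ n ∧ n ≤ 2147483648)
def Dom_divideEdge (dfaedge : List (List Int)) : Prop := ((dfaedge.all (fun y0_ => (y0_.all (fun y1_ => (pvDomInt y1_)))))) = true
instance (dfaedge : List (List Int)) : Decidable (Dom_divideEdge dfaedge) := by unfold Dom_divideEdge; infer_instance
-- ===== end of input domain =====

-- B builds groups by element-wise accumulation (grow current group, flush on key change, append the final group) instead of A's index scan that cuts slices.


-- ===== PORT A =====
-- A's test 'dfaedge[i][0] != dfaedge[i-1][0]'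
def pvBrk (dfaedge : List (List Int)) (i : Int) : Bool :=
  decide (PySem.List.pyGet? ((PySem.List.pyGet? dfaedge i).getD []) 0 ≠
          PySem.List.pyGet? ((PySem.List.pyGet? dfaedge (i - 1)).getD []) 0)

-- A: one pass over the index range with state (newlist, k); on each break append the slice dfaedge[k:i] and move k.
def divideEdge (dfaedge : List (List Int)) : List (List (List Int)) :=
  let n : Int := dfaedge.length
  let st := (PySem.List.pyRange 1 n 1).foldl
    (fun (st : List (List (List Int)) × Int) i =>
      if pvBrk dfaedge i then
        (st.1 ++ [PySem.List.slice dfaedge (some st.2) (some i)], i)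
      else st) ([], 0)
  st.1 ++ [PySem.List.slice dfaedge (some st.2) (some n)]

-- ===== PORT B =====
-- B: fold over the edges with state (groups, cur); flush cur when the key changes ('cur and cur[-1][0] != e[0]').
def divideEdge_alt (dfaedge : List (List Int)) : List (List (List Int)) :=
  let st := dfaedge.foldl
    (fun (st : List (List (List Int)) × List (List Int)) e =>
      if st.2 ≠ [] ∧ PySem.List.pyGet? ((PySem.List.pyGet? st.2 (-1)).getD []) 0 ≠ PySem.List.pyGet? e 0
      then (st.1 ++ [st.2], [e])
      else (st.1, st.2 ++ [e])) ([], [])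
  st.1 ++ [st.2]

-- ===== PRECONDITION & SPEC =====
-- Pre_ excludes exactly the inputs on which Python A raises IndexError: an empty inner list is
-- indexed with [0] whenever the outer list has at least two elements.
def Pre_divideEdge (dfaedge : List (List Int)) : Prop :=
  dfaedge.length ≤ 1 ∨ ∀ e ∈ dfaedge, e ≠ []
instance (dfaedge : List (List Int)) : Decidable (Pre_divideEdge dfaedge) := by
  unfold Pre_divideEdge; infer_instance
def pvWitness_divideEdge : List (List Int) := [[1, 2], [1, 3], [2, 4]]

def Spec_divideEdge (dfaedge : List (List Int)) (out : List (List (List Int))) : Prop :=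
  out = divideEdge_alt dfaedge
instance (dfaedge : List (List Int)) (out : List (List (List Int))) : Decidable (Spec_divideEdge dfaedge out) := by unfold Spec_divideEdge; infer_instance

-- ===== CLAIM (what is proved, stated in full; the proofs are below) =====
def Claim_equal_divideEdge : Prop := ∀ (dfaedge : List (List Int)), Dom_divideEdge dfaedge → Pre_divideEdge dfaedge → Spec_divideEdge dfaedge (divideEdge dfaedge)

-- ===== LEMMAS AND PROOFS =====

-- the break indices of the prefix of length i
def pvB (df : List (List Int)) (i : Int) : List Int :=
  (PySem.List.pyRange 1 i 1).filter (pvBrk df)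

-- slices between consecutive members of k :: ys
def pvChunks (df : List (List Int)) : Int → List Int → List (List (List Int))
  | _, [] => []
  | k, i :: rest => PySem.List.slice df (some k) (some i) :: pvChunks df i rest

theorem pvFoldA (df : List (List Int)) (L : List Int)
    (acc : List (List (List Int))) (k : Int) :
    L.foldl
      (fun (st : List (List (List Int)) × Int) i =>
        if pvBrk df i then
          (st.1 ++ [PySem.List.slice df (some st.2) (some i)], i)
        else st) (acc, k)
    = (acc ++ pvChunks df k (L.filter (pvBrk df)), (L.filter (pvBrk df)).getLastD k) := by
  induction L generalizing acc k with
  | nil => simp [pvChunks]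
  | cons i rest ih =>
    by_cases h : pvBrk df i
    · simp only [List.foldl_cons, List.filter_cons, h, ih]
      cases rest.filter (pvBrk df) <;>
        simp [pvChunks, List.getLast?_cons]
    · simp only [List.foldl_cons, List.filter_cons, h, ih]
      simp

theorem pvB_last_bounds (df : List (List Int)) (i : Int) :
    0 ≤ (pvB df i).getLastD 0 ∧ (pvB df i).getLastD 0 < i ∨ (pvB df i) = [] ∧ (pvB df i).getLastD 0 = 0 := by
  rcases hL : (pvB df i).getLast? with _ | x
  · right
    exact ⟨List.getLast?_eq_none_iff.mp hL, by simp [List.getLastD_eq_getLast?, hL]⟩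
  · left
    have hx : x ∈ pvB df i := List.mem_of_getLast? hL
    have hmem : x ∈ PySem.List.pyRange 1 i 1 := List.mem_of_mem_filter hx
    rw [PySem.List.mem_pyRange_one] at hmem
    have : (pvB df i).getLastD 0 = x := by simp [List.getLastD_eq_getLast?, hL]
    omega

theorem pvSliceSnoc (df : List (List Int)) (a : Int) (m : Nat)
    (ha : 0 ≤ a) (ham : a ≤ (m : Int)) (hm : m < df.length) :
    PySem.List.slice df (some a) (some (m : Int)) ++ [df[m]]
      = PySem.List.slice df (some a) (some ((m : Int) + 1)) := by
  have h1 : ((m : Int) + 1) = ((m + 1 : Nat) : Int) := by push_cast; ring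
  rw [h1, PySem.List.slice_toNat df ha (by positivity), PySem.List.slice_toNat df ha (by positivity)]
  have hms : ((m : Int)).toNat = m := by omega
  have hms1 : ((m + 1 : Nat) : Int).toNat = m + 1 := by omega
  rw [hms, hms1]
  set t := a.toNat with ht
  have hta : t ≤ m := by omega
  have hgoal : (df.drop t).take (m - t) ++ [df[m]] = (df.drop t).take (m + 1 - t) := by
    have hmt : m + 1 - t = (m - t) + 1 := by omega
    rw [hmt, List.take_add_one]
    have hlen : m - t < (df.drop t).length := by
      rw [List.length_drop]; omega
    have : (df.drop t)[m - t]? = some df[m] := by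
      rw [List.getElem?_eq_getElem hlen]
      congr 1
      rw [List.getElem_drop]
      congr 1; omega
    rw [this]
    simp
  exact hgoal

theorem pvSliceDecomp (df : List (List Int)) (a : Int) (m : Nat)
    (ha : 0 ≤ a) (ham : a < (m : Int)) (hm : m ≤ df.length) :
    PySem.List.slice df (some a) (some (m : Int))
      = PySem.List.slice df (some a) (some ((m - 1 : Nat) : Int)) ++ [df[m - 1]] := by
  have hm1 : m - 1 < df.length := by omega
  have := pvSliceSnoc df a (m - 1) ha (by omega) hm1
  rw [this]
  congr 1
  push_cast [Nat.cast_sub (by omega : 1 ≤ m)]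
  ring_nf

theorem pvChunks_append_last (df : List (List Int)) (xs : List Int) (k n : Int) :
    pvChunks df k (xs ++ [n])
      = pvChunks df k xs ++ [PySem.List.slice df (some (xs.getLastD k)) (some n)] := by
  induction xs generalizing k with
  | nil => simp [pvChunks]
  | cons i rest ih =>
    simp only [List.cons_append, pvChunks, ih]
    cases rest <;> simp [List.getLast?_cons]

theorem pvFoldB (df : List (List Int)) (m : Nat) (h1 : 1 ≤ m) (hm : m ≤ df.length) :
    (df.take m).foldl
      (fun (st : List (List (List Int)) × List (List Int)) e =>
        if st.2 ≠ [] ∧ PySem.List.pyGet? ((PySem.List.pyGet? st.2 (-1)).getD []) 0 ≠ PySem.List.pyGet? e 0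
        then (st.1 ++ [st.2], [e])
        else (st.1, st.2 ++ [e])) ([], [])
    = (pvChunks df 0 (pvB df (m : Int)),
       PySem.List.slice df (some ((pvB df (m : Int)).getLastD 0)) (some (m : Int))) := by
  induction m with
  | zero => omega
  | succ m ih =>
    by_cases hm1 : 1 ≤ m
    · -- inductive step: m ≥ 1, process element df[m]
      have hmlt : m < df.length := by omega
      have htake : df.take (m + 1) = df.take m ++ [df[m]] := by
        rw [List.take_add_one, List.getElem?_eq_getElem hmlt]; simp
      rw [htake, List.foldl_append, ih hm1 (by omega)]
      simp only [List.foldl_cons, List.foldl_nil]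
      -- the current slice
      have hlast := pvB_last_bounds df (m : Int)
      set a : Int := (pvB df (m : Int)).getLastD 0 with hadef
      have hab : 0 ≤ a ∧ a < (m : Int) := by
        rcases hlast with h | h
        · exact h
        · have := h.2; constructor <;> omega
      -- decompose cur = slice a m as slice a (m-1) ++ [df[m-1]]
      have hdec := pvSliceDecomp df a m hab.1 hab.2 (by omega)
      have hcur_ne : PySem.List.slice df (some a) (some (m : Int)) ≠ [] := by
        rw [hdec]; simp
      have hcur_last : PySem.List.pyGet? (PySem.List.slice df (some a) (some (m : Int))) (-1)
          = some df[m - 1] := by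
        rw [hdec, PySem.List.pyGet?_neg_one_append_singleton]
      -- the guard equals pvBrk df m
      have hguard :
          ((PySem.List.slice df (some a) (some (m : Int))) ≠ [] ∧
            PySem.List.pyGet? ((PySem.List.pyGet? (PySem.List.slice df (some a) (some (m : Int))) (-1)).getD []) 0
              ≠ PySem.List.pyGet? df[m] 0)
          ↔ pvBrk df (m : Int) = true := by
      -- pvBrk df m compares df[m][0] with df[m-1][0]
        rw [hcur_last]
        unfold pvBrk
        have e1 : PySem.List.pyGet? df (m : Int) = some df[m] := by
          simp [PySem.List.pyGet?_natCast, List.getElem?_eq_getElem hmlt]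
        have e2 : PySem.List.pyGet? df ((m : Int) - 1) = some df[m - 1] := by
          have : (m : Int) - 1 = ((m - 1 : Nat) : Int) := by omega
          rw [this]
          simp [PySem.List.pyGet?_natCast, List.getElem?_eq_getElem (by omega : m - 1 < df.length)]
        rw [e1, e2]
        simp only [Option.getD_some, decide_eq_true_eq]
        constructor
        · rintro ⟨-, h⟩; exact fun he => h he.symm
        · intro h; exact ⟨hcur_ne, fun he => h he.symm⟩
      -- the new break list
      have hB : pvB df ((m : Int) + 1)
          = pvB df (m : Int) ++ if pvBrk df (m : Int) then [(m : Int)] else [] := by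
        unfold pvB
        rw [PySem.List.pyRange_one_succ_right (by exact_mod_cast hm1), List.filter_append]
        by_cases hb : pvBrk df (m : Int) <;> simp [hb]
      have hcast : ((m + 1 : Nat) : Int) = (m : Int) + 1 := by push_cast; ring
      by_cases hb : pvBrk df (m : Int)
      · -- break: flush cur, start [df[m]]
        rw [if_pos (hguard.mpr hb)]
        rw [hcast, hB, if_pos hb]
        simp only [Prod.mk.injEq]
        refine ⟨?_, ?_⟩
        · -- chunks: pvChunks df 0 (B ++ [m]) = pvChunks df 0 B ++ [slice a m]
          rw [pvChunks_append_last, ← hadef]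
        · -- new cur = [df[m]] = slice m (m+1)
          have hlastm : (pvB df (m : Int) ++ [(m : Int)]).getLastD 0 = (m : Int) := by simp
          rw [hlastm]
          have hsnoc := pvSliceSnoc df (m : Int) m (by positivity) le_rfl hmlt
          rw [← hsnoc]
          have hnilsl : PySem.List.slice df (some (m : Int)) (some (m : Int)) = [] := by
            rw [PySem.List.slice_toNat df (by positivity) (by positivity)]
            simp
          rw [hnilsl, List.nil_append]
      · -- no break: extend cur
        rw [if_neg (fun hc => hb (hguard.mp hc))]
        rw [hcast, hB, if_neg hb, List.append_nil]
        simp only [Prod.mk.injEq]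
        refine ⟨trivial, ?_⟩
        rw [← hadef]
        exact pvSliceSnoc df a m hab.1 (le_of_lt hab.2) hmlt
    · -- base: m = 0, first element
      have hm0 : m = 0 := by omega
      subst hm0
      have hc1 : ((0 + 1 : Nat) : Int) = 1 := by norm_num
      have h0 : 0 < df.length := by omega
      have htake : df.take 1 = [df[0]] := by
        rw [List.take_add_one, List.getElem?_eq_getElem h0]; simp
      rw [htake, hc1]
      have hB : pvB df (1 : Int) = [] := by
        unfold pvB
        rw [PySem.List.pyRange_one_eq_nil le_rfl]; rfl
      rw [hB]
      simp only [List.foldl_cons, List.foldl_nil]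
      have hslice : PySem.List.slice df (some (([] : List Int).getLastD 0)) (some (1 : Int)) = [df[0]] := by
        have h01 : ([] : List Int).getLastD 0 = ((0 : Nat) : Int) := by simp
        have h1c : (1 : Int) = ((1 : Nat) : Int) := by norm_num
        rw [h01, h1c, PySem.List.slice_natCast]
        simpa using htake
      rw [hslice]
      simp [pvChunks]

-- ===== VERDICT (by name: the statement is the Claim_ definition above) =====
theorem divideEdge_spec : Claim_equal_divideEdge := by
  intro df _ _
  unfold Spec_divideEdge
  by_cases hD : df = []
  · subst hD; rfl
  · have hn : 1 ≤ df.length := by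
      cases df with
      | nil => exact absurd rfl hD
      | cons a l => simp
    have hfoldB := pvFoldB df df.length hn le_rfl
    rw [List.take_length] at hfoldB
    unfold divideEdge divideEdge_alt
    simp only [pvFoldA, hfoldB, List.nil_append]
    rfl
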